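-- pv_equiv track=rewrite | github.com/markedel/python-g | filefmt.py | _leftArgLineCol
-- ===== SOURCE A (Python) =====
-- def _leftArgLineCol(modLineNum, modColNum, text, idx):
--     """Binary operators and assignments, unfortunately, do not encode the line and
--     column of the operator, but of the entire expression.  The code here, marches
--     backward from the index where the operator starts (idx) to find the first
--     non-white, decrementing modLineNum and modColNum per corresponding newlines and
--     whitespace characters found in the string (text).  If no whitespace is found,
--     returns -1 for both line and column.  The calling code will index the macro data
--     by for the AST using the returned line and column, which will correspond to the
--     rightmost character of its left argument."""
--     for i in range(idx-1, -1, -1):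
--         if text[i] == '\n':
--             modLineNum -= 1
--             for pl in range(i-1, -1, -1):
--                 if text[pl] == '\n':
--                     prevLineStart = pl + 1
--                     break
--             else:
--                 prevLineStart = 0
--             modColNum = i - prevLineStart
--         elif text[i] in '\t ':
--             modColNum -= 1
--         else:
--             return modLineNum, modColNum
--     return -1, -1
-- ===== SOURCE B (Python) =====
-- def _leftArgLineCol(modLineNum, modColNum, text, idx):
--     j = None
--     for i in range(idx - 1, -1, -1):
--         if text[i] not in '\t \n':
--             j = i
--             break
--     if j is None:
--         return -1, -1
--     n = text[j + 1:idx].count('\n')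
--     if n == 0:
--         return modLineNum, modColNum - (idx - 1 - j)
--     lineStart = text.rfind('\n', 0, j) + 1
--     return modLineNum - n, j - lineStart + 1
-- ===== Notes on version B (the rewrite author's own statement) =====
-- stated objective: simpler
-- what changed: A's stateful backward walk that decrements line/col per whitespace char and recomputes the column at every newline is replaced by one backward search for the rightmost non-white index j, then closed-form arithmetic: line = modLineNum - count of newlines in text[j+1:idx], column from modColNum if no newline was crossed, else from rfind('\n',0,j).
import Mathlib
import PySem

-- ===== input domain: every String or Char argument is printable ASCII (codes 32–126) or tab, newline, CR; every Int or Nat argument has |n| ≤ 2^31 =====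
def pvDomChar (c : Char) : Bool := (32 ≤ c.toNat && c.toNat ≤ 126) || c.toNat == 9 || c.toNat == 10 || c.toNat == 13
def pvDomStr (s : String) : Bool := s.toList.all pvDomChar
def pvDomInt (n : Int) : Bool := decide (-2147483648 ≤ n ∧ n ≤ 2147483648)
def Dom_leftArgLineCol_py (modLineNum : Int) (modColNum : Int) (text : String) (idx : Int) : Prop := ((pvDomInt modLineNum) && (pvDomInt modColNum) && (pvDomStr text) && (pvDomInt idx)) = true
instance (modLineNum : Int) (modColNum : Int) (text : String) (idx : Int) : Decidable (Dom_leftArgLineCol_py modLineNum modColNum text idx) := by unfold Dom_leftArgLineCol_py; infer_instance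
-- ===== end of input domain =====

-- B replaces A's stateful backward decrement loop by one backward search for the
-- rightmost non-white char plus closed-form arithmetic (newline count + rfind): simpler.

-- ===== PORT A =====
-- inner loop: for pl in range(i-1,-1,-1): if text[pl]=='\n': prevLineStart=pl+1; break / else: prevLineStart=0
def pvA_prevStart (text : List Char) : Nat → Nat
  | 0 => 0
  | Nat.succ pl => if PySem.List.pyGet? text (pl : Int) = some '\n' then pl + 1 else pvA_prevStart text pl

-- outer loop: for i in range(idx-1,-1,-1), fuel = i+1
def pvA_loop (text : List Char) : Nat → Int → Int → Int × Int
  | 0, _, _ => (-1, -1)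
  | Nat.succ i, line, col =>
    match PySem.List.pyGet? text (i : Int) with
    | none => (0, 0)   -- IndexError in Python (idx-1 ≥ len(text)); excluded by Pre_
    | some c =>
      if c = '\n' then
        pvA_loop text i (line - 1) ((i : Int) - (pvA_prevStart text i : Int))
      else if c = '\t' ∨ c = ' ' then
        pvA_loop text i line (col - 1)
      else (line, col)

def leftArgLineCol_py (modLineNum : Int) (modColNum : Int) (text : String) (idx : Int) : Int × Int :=
  pvA_loop text.toList idx.toNat modLineNum modColNum

-- ===== PORT B =====
-- backward loop: for i in range(idx-1,-1,-1): if text[i] not in '\t \n': j = i; break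
def pvB_findJ (text : List Char) : Nat → Option Nat
  | 0 => none
  | Nat.succ i =>
    match PySem.List.pyGet? text (i : Int) with
    | none => none   -- IndexError in Python B as well; excluded by Pre_
    | some c => if c ≠ '\t' ∧ c ≠ ' ' ∧ c ≠ '\n' then some i else pvB_findJ text i

-- text.rfind('\n', 0, j): exact hand port for a one-char needle; -1 if absent
def pvB_rfindNl (text : List Char) : Nat → Int
  | 0 => -1
  | Nat.succ p => if PySem.List.pyGet? text (p : Int) = some '\n' then (p : Int) else pvB_rfindNl text p

def leftArgLineCol_py_alt (modLineNum : Int) (modColNum : Int) (text : String) (idx : Int) : Int × Int :=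
  match pvB_findJ text.toList idx.toNat with
  | none => (-1, -1)
  | some j =>
    -- n = text[j+1:idx].count('\n')  (single-char count = List.count on the slice)
    let n : Nat := (PySem.List.slice text.toList (some ((j : Int) + 1)) (some idx)).count '\n'
    if n = 0 then (modLineNum, modColNum - (idx - 1 - (j : Int)))
    else (modLineNum - (n : Int), (j : Int) - (pvB_rfindNl text.toList j + 1) + 1)

-- ===== PRECONDITION & SPEC =====
-- Pre_ excludes exactly the inputs where A raises IndexError: idx-1 beyond the end of text.
def Pre_leftArgLineCol_py (modLineNum : Int) (modColNum : Int) (text : String) (idx : Int) : Prop :=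
  idx ≤ (text.toList.length : Int)
instance (modLineNum : Int) (modColNum : Int) (text : String) (idx : Int) : Decidable (Pre_leftArgLineCol_py modLineNum modColNum text idx) := by unfold Pre_leftArgLineCol_py; infer_instance

def pvWitness_leftArgLineCol_py : Int × Int × String × Int := (3, 7, "ab \n\t cd", 6)

def Spec_leftArgLineCol_py (modLineNum : Int) (modColNum : Int) (text : String) (idx : Int) (out : Int × Int) : Prop := out = leftArgLineCol_py_alt modLineNum modColNum text idx
instance (modLineNum : Int) (modColNum : Int) (text : String) (idx : Int) (out : Int × Int) : Decidable (Spec_leftArgLineCol_py modLineNum modColNum text idx out) := by unfold Spec_leftArgLineCol_py; infer_instance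

-- ===== CLAIM (what is proved, stated in full; the proofs are below) =====
def Claim_equal_leftArgLineCol_py : Prop := ∀ (modLineNum : Int) (modColNum : Int) (text : String) (idx : Int), Dom_leftArgLineCol_py modLineNum modColNum text idx → Pre_leftArgLineCol_py modLineNum modColNum text idx → Spec_leftArgLineCol_py modLineNum modColNum text idx (leftArgLineCol_py modLineNum modColNum text idx)

-- ===== LEMMAS AND PROOFS =====

-- window newline count used in the induction
def pvCnt (text : List Char) (a b : Nat) : Nat := ((text.drop a).take (b - a)).count '\n'

lemma pvCnt_self (text : List Char) (a b : Nat) (h : b ≤ a) : pvCnt text a b = 0 := by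
  simp [pvCnt, Nat.sub_eq_zero_of_le h]

lemma pvCnt_succ (text : List Char) (a k : Nat) (c : Char) (ha : a ≤ k)
    (hc : PySem.List.pyGet? text (k : Int) = some c) :
    pvCnt text a (k + 1) = pvCnt text a k + (if c = '\n' then 1 else 0) := by
  have hk : k < text.length := by
    by_contra h
    simp [PySem.List.pyGet?_natCast, List.getElem?_eq_none (by omega : text.length ≤ k)] at hc
  have hget : text[k]? = some c := by
    simpa [PySem.List.pyGet?_natCast] using hc
  have h1 : k + 1 - a = (k - a) + 1 := by omega
  rw [pvCnt, pvCnt, h1, List.take_succ]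
  have h2 : (text.drop a)[k - a]? = some c := by
    rw [List.getElem?_drop]
    rwa [show a + (k - a) = k by omega]
  simp [h2, List.count_append]
  split_ifs <;> simp_all

lemma pvCnt_zero_no_nl (text : List Char) (a b m : Nat) (h : pvCnt text a b = 0)
    (ham : a ≤ m) (hmb : m < b) (hml : m < text.length) :
    text[m]? ≠ some '\n' := by
  intro hm
  have hmem : '\n' ∈ (text.drop a).take (b - a) := by
    have hlt : m - a < b - a := by omega
    have hidx : m - a < ((text.drop a).take (b - a)).length := by
      simp [List.length_take, List.length_drop]; omega
    have hgm : text[m] = '\n' := by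
      have h4 := hm
      rw [List.getElem?_eq_getElem hml] at h4
      exact Option.some.inj h4
    have : ((text.drop a).take (b - a))[m - a] = '\n' := by
      rw [List.getElem_take, List.getElem_drop]
      simp only [show a + (m - a) = m by omega, hgm]
    exact this ▸ List.getElem_mem hidx
  rw [pvCnt] at h
  exact (List.count_eq_zero.mp h) hmem

lemma pvB_findJ_lt (text : List Char) (k j : Nat) (h : pvB_findJ text k = some j) : j < k := by
  induction k with
  | zero => simp [pvB_findJ] at h
  | succ i ih =>
    rw [pvB_findJ] at h
    rcases hg : PySem.List.pyGet? text (i : Int) with _ | c <;> rw [hg] at h <;> dsimp only at h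
    · simp at h
    · split_ifs at h with hc
      · simp at h; omega
      · exact Nat.lt_succ_of_lt (ih h)

lemma pvB_findJ_char (text : List Char) (k j : Nat) (h : pvB_findJ text k = some j) :
    ∃ c, PySem.List.pyGet? text (j : Int) = some c ∧ c ≠ '\t' ∧ c ≠ ' ' ∧ c ≠ '\n' := by
  induction k with
  | zero => simp [pvB_findJ] at h
  | succ i ih =>
    rw [pvB_findJ] at h
    rcases hg : PySem.List.pyGet? text (i : Int) with _ | c <;> rw [hg] at h <;> dsimp only at h
    · simp at h
    · split_ifs at h with hc
      · simp at h; subst h; exact ⟨c, hg, hc⟩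
      · exact ih h

-- A's inner scan skips a block of non-newline positions
lemma pvA_prevStart_skip (text : List Char) (j k : Nat) (hjk : j ≤ k)
    (h : ∀ m, j ≤ m → m < k → PySem.List.pyGet? text (m : Int) ≠ some '\n') :
    pvA_prevStart text k = pvA_prevStart text j := by
  induction k with
  | zero => have : j = 0 := by omega
            simp [this]
  | succ i ih =>
    rcases Nat.eq_or_lt_of_le hjk with h1 | h1
    · simp [h1]
    · rw [pvA_prevStart]
      rw [if_neg (h i (by omega) (by omega))]
      exact ih (by omega) (fun m hm1 hm2 => h m hm1 (by omega))

-- A's inner scan equals B's rfind, shifted by one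
lemma pvA_prevStart_rfind (text : List Char) (p : Nat) :
    (pvA_prevStart text p : Int) = pvB_rfindNl text p + 1 := by
  induction p with
  | zero => simp [pvA_prevStart, pvB_rfindNl]
  | succ q ih =>
    rw [pvA_prevStart, pvB_rfindNl]
    split_ifs with h
    · push_cast; ring
    · exact ih

-- the main loop invariant: A's loop with fuel k equals B's closed-form answer over window [0, k)
lemma pv_key (text : List Char) (k : Nat) (hk : k ≤ text.length) (line col : Int) :
    pvA_loop text k line col =
      match pvB_findJ text k with
      | none => (-1, -1)
      | some j =>
        if pvCnt text (j + 1) k = 0 then (line, col - ((k : Int) - 1 - (j : Int)))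
        else (line - (pvCnt text (j + 1) k : Int), (j : Int) - (pvB_rfindNl text j + 1) + 1) := by
  induction k generalizing line col with
  | zero => simp [pvA_loop, pvB_findJ]
  | succ i ih =>
    have hi : i < text.length := by omega
    have hget : PySem.List.pyGet? text (i : Int) = some text[i] := by
      simp [PySem.List.pyGet?_natCast, List.getElem?_eq_getElem hi]
    rw [pvA_loop, pvB_findJ, hget]
    dsimp only
    set c := text[i] with hc
    by_cases hnw : c ≠ '\t' ∧ c ≠ ' ' ∧ c ≠ '\n'
    · -- non-white: A returns, B finds j = i
      rw [if_neg hnw.2.2, if_neg (by tauto), if_pos hnw]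
      have : pvCnt text (i + 1) (i + 1) = 0 := pvCnt_self _ _ _ le_rfl
      simp [this]
    · -- white char: both sides recurse on fuel i
      rw [if_neg hnw]
      have hrec : ∀ line' col',
          (match pvB_findJ text i with
           | none => (-1, -1)
           | some j =>
             if pvCnt text (j + 1) i = 0 then (line', col' - ((i : Int) - 1 - (j : Int)))
             else (line' - (pvCnt text (j + 1) i : Int), (j : Int) - (pvB_rfindNl text j + 1) + 1))
          = pvA_loop text i line' col' := fun line' col' => (ih (by omega) line' col').symm
      by_cases hn : c = '\n'
      · rw [if_pos hn]
        rw [← hrec (line - 1) ((i : Int) - (pvA_prevStart text i : Int))]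
        rcases hfj : pvB_findJ text i with _ | j
        · rfl
        · have hjlt := pvB_findJ_lt text i j hfj
          have hcount : pvCnt text (j + 1) (i + 1) = pvCnt text (j + 1) i + 1 := by
            rw [pvCnt_succ text (j + 1) i c (by omega) hget, if_pos hn]
          simp only
          rw [hcount]
          by_cases h0 : pvCnt text (j + 1) i = 0
          · rw [if_pos h0, if_neg (by omega)]
            -- col: i - prevStart i - (i - 1 - j) = j - (rfind j + 1) + 1
            obtain ⟨cj, hcj, hcjt⟩ := pvB_findJ_char text i j hfj
            have hskip : pvA_prevStart text i = pvA_prevStart text j := by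
              apply pvA_prevStart_skip text j i (by omega)
              intro m hm1 hm2
              rcases Nat.eq_or_lt_of_le hm1 with he | hlt
              · rw [← he]; rw [hcj]; simp [hcjt.2.2]
              · have hml : m < text.length := by omega
                have hno := pvCnt_zero_no_nl text (j + 1) i m h0 (by omega) hm2 hml
                rw [PySem.List.pyGet?_natCast]
                exact hno
            rw [hskip, pvA_prevStart_rfind]
            have : pvCnt text (j + 1) i + 1 = 1 := by omega
            rw [this]
            rw [Prod.mk.injEq]
            refine ⟨by norm_num, by push_cast; ring⟩
          · rw [if_neg h0, if_neg (by omega)]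
            rw [Prod.mk.injEq]
            exact ⟨by push_cast; ring, rfl⟩
      · -- tab or space
        have hts : c = '\t' ∨ c = ' ' := by tauto
        rw [if_neg hn, if_pos hts]
        rw [← hrec line (col - 1)]
        rcases hfj : pvB_findJ text i with _ | j
        · rfl
        · have hjlt := pvB_findJ_lt text i j hfj
          have hcount : pvCnt text (j + 1) (i + 1) = pvCnt text (j + 1) i := by
            rw [pvCnt_succ text (j + 1) i c (by omega) hget, if_neg hn, Nat.add_zero]
          simp only
          rw [hcount]
          by_cases h0 : pvCnt text (j + 1) i = 0
          · rw [if_pos h0, if_pos h0]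
            rw [Prod.mk.injEq]
            exact ⟨rfl, by push_cast; ring⟩
          · rw [if_neg h0, if_neg h0]

-- ===== VERDICT (by name: the statement is the Claim_ definition above) =====
theorem leftArgLineCol_py_spec : Claim_equal_leftArgLineCol_py := by
  intro line col text idx _ hpre
  unfold Spec_leftArgLineCol_py leftArgLineCol_py leftArgLineCol_py_alt
  have hk : idx.toNat ≤ text.toList.length := by
    unfold Pre_leftArgLineCol_py at hpre; omega
  rw [pv_key text.toList idx.toNat hk line col]
  rcases hfj : pvB_findJ text.toList idx.toNat with _ | j
  · rfl
  · have hjlt := pvB_findJ_lt _ _ _ hfj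
    have hidx : 0 ≤ idx := by
      by_contra h
      have : idx.toNat = 0 := by omega
      rw [this] at hfj; simp [pvB_findJ] at hfj
    have hslice : PySem.List.slice text.toList (some ((j : Int) + 1)) (some idx)
        = (text.toList.drop (j + 1)).take (idx.toNat - (j + 1)) := by
      have h1 : ((j : Int) + 1) = ((j + 1 : Nat) : Int) := by push_cast; ring
      have h2 : idx = ((idx.toNat : Nat) : Int) := by omega
      rw [h1, h2, PySem.List.slice_natCast, Int.toNat_natCast]
    simp only [hslice]
    have hcnt : ((text.toList.drop (j + 1)).take (idx.toNat - (j + 1))).count '\n'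
        = pvCnt text.toList (j + 1) idx.toNat := rfl
    rw [hcnt]
    by_cases h0 : pvCnt text.toList (j + 1) idx.toNat = 0
    · rw [if_pos h0, if_pos h0]
      rw [Prod.mk.injEq]
      refine ⟨rfl, ?_⟩
      have : (idx.toNat : Int) = idx := by omega
      rw [this]
    · rw [if_neg h0, if_neg h0]
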